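-- pv_equiv track=rewrite | github.com/yazhog/remnawave-bedolaga-telegram-bot | app/services/startup_notification_service.py | _get_error_recommendations
-- ===== SOURCE A (Python) =====
-- from typing import Final
--
-- WEBHOOK_ERROR_KEYWORDS: Final[tuple[str, ...]] = ('webhook', 'failed to resolve host')
--
-- DATABASE_ERROR_KEYWORDS: Final[tuple[str, ...]] = ('database', 'postgres', 'connection refused')
--
-- REDIS_ERROR_KEYWORD: Final[str] = 'redis'
--
-- REMNAWAVE_ERROR_KEYWORDS: Final[tuple[str, ...]] = ('remnawave', 'panel')
--
-- AUTH_ERROR_KEYWORDS: Final[tuple[str, ...]] = ('unauthorized', 'bot token')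
--
-- INLINE_BUTTON_URL_ERROR_KEYWORDS: Final[tuple[str, ...]] = (
--     'web app url',
--     'url host is empty',
--     'unsupported url protocol',
--     'button url',
-- )
--
-- def _get_error_recommendations(error_message: str) -> str | None:
--     """
--     Возвращает рекомендации по исправлению ошибки на основе текста ошибки.
--
--     Args:
--         error_message: Текст ошибки
--
--     Returns:
--         Рекомендации в формате HTML blockquote или None
--     """
--     error_lower = error_message.lower()
--
--     # Ошибки вебхука
--     if any(keyword in error_lower for keyword in WEBHOOK_ERROR_KEYWORDS):
--         tips = [
--             '• Проверьте WEBHOOK_HOST в .env',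
--             '• Убедитесь что домен доступен извне',
--             '• Проверьте SSL сертификат (должен быть валидный)',
--             '• Проверьте reverse proxy (nginx/caddy)',
--             '• Проверьте сеть Docker (docker network)',
--             '• Попробуйте: docker compose restart',
--         ]
--         return '<blockquote expandable>💡 <b>Рекомендации:</b>\n' + '\n'.join(tips) + '</blockquote>'
--
--     # Ошибки подключения к БД
--     if any(keyword in error_lower for keyword in DATABASE_ERROR_KEYWORDS):
--         tips = [
--             '• Проверьте что PostgreSQL запущен',
--             '• Проверьте DATABASE_URL в .env',
--             '• Проверьте сеть Docker между контейнерами',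
--             '• Попробуйте: docker compose restart db',
--         ]
--         return '<blockquote expandable>💡 <b>Рекомендации:</b>\n' + '\n'.join(tips) + '</blockquote>'
--
--     # Ошибки Redis
--     if REDIS_ERROR_KEYWORD in error_lower:
--         tips = [
--             '• Проверьте что Redis запущен',
--             '• Проверьте REDIS_URL в .env',
--             '• Попробуйте: docker compose restart redis',
--         ]
--         return '<blockquote expandable>💡 <b>Рекомендации:</b>\n' + '\n'.join(tips) + '</blockquote>'
--
--     # Ошибки Remnawave API
--     if any(keyword in error_lower for keyword in REMNAWAVE_ERROR_KEYWORDS):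
--         tips = [
--             '• Проверьте REMNAWAVE_API_URL в .env',
--             '• Проверьте REMNAWAVE_API_KEY',
--             '• Убедитесь что панель Remnawave доступна',
--         ]
--         return '<blockquote expandable>💡 <b>Рекомендации:</b>\n' + '\n'.join(tips) + '</blockquote>'
--
--     # Ошибки токена бота
--     if any(keyword in error_lower for keyword in AUTH_ERROR_KEYWORDS):
--         tips = [
--             '• Проверьте BOT_TOKEN в .env',
--             '• Убедитесь что токен актуален (@BotFather)',
--         ]
--         return '<blockquote expandable>💡 <b>Рекомендации:</b>\n' + '\n'.join(tips) + '</blockquote>'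
--
--     # Ошибки inline-кнопок с URL (WebApp, кастомные протоколы)
--     if any(keyword in error_lower for keyword in INLINE_BUTTON_URL_ERROR_KEYWORDS):
--         tips = [
--             '• Проверьте MINIAPP_CUSTOM_URL в .env',
--             '• Проверьте HAPP_CRYPTOLINK_REDIRECT_TEMPLATE',
--             '• Telegram не поддерживает кастомные схемы (happ://, v2ray://, ss://, и т.д.) в inline-кнопках',
--             '• Используйте HTTPS редирект для диплинков',
--         ]
--         return '<blockquote expandable>💡 <b>Рекомендации:</b>\n' + '\n'.join(tips) + '</blockquote>'
--
--     return None
-- ===== SOURCE B (Python) =====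
-- # Flat keyword -> group-index map; the answer is the tips of the SMALLEST matched
-- # group index (groups are numbered in A's branch order, so min == first branch to fire).
--
-- _KEYWORD_GROUP = {
--     'webhook': 0,
--     'failed to resolve host': 0,
--     'database': 1,
--     'postgres': 1,
--     'connection refused': 1,
--     'redis': 2,
--     'remnawave': 3,
--     'panel': 3,
--     'unauthorized': 4,
--     'bot token': 4,
--     'web app url': 5,
--     'url host is empty': 5,
--     'unsupported url protocol': 5,
--     'button url': 5,
-- }
--
-- _TIPS = {
--     0: [
--         '• Проверьте WEBHOOK_HOST в .env',
--         '• Убедитесь что домен доступен извне',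
--         '• Проверьте SSL сертификат (должен быть валидный)',
--         '• Проверьте reverse proxy (nginx/caddy)',
--         '• Проверьте сеть Docker (docker network)',
--         '• Попробуйте: docker compose restart',
--     ],
--     1: [
--         '• Проверьте что PostgreSQL запущен',
--         '• Проверьте DATABASE_URL в .env',
--         '• Проверьте сеть Docker между контейнерами',
--         '• Попробуйте: docker compose restart db',
--     ],
--     2: [
--         '• Проверьте что Redis запущен',
--         '• Проверьте REDIS_URL в .env',
--         '• Попробуйте: docker compose restart redis',
--     ],
--     3: [
--         '• Проверьте REMNAWAVE_API_URL в .env',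
--         '• Проверьте REMNAWAVE_API_KEY',
--         '• Убедитесь что панель Remnawave доступна',
--     ],
--     4: [
--         '• Проверьте BOT_TOKEN в .env',
--         '• Убедитесь что токен актуален (@BotFather)',
--     ],
--     5: [
--         '• Проверьте MINIAPP_CUSTOM_URL в .env',
--         '• Проверьте HAPP_CRYPTOLINK_REDIRECT_TEMPLATE',
--         '• Telegram не поддерживает кастомные схемы (happ://, v2ray://, ss://, и т.д.) в inline-кнопках',
--         '• Используйте HTTPS редирект для диплинков',
--     ],
-- }
--
--
-- def _get_error_recommendations(error_message: str) -> str | None: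
--     error_lower = error_message.lower()
--     matched = [group for keyword, group in _KEYWORD_GROUP.items() if keyword in error_lower]
--     if not matched:
--         return None
--     tips = _TIPS[min(matched)]
--     return '<blockquote expandable>💡 <b>Рекомендации:</b>\n' + '\n'.join(tips) + '</blockquote>'
-- ===== Notes on version B (the rewrite author's own statement) =====
-- stated objective: alternative
-- what changed: Replaces A's six sequential if-branches (first match wins) by a flat keyword-to-group-index map: one comprehension collects ALL matched group indices, and the answer is the tips of the minimum index, which coincides with the first branch to fire.
import Mathlib
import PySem

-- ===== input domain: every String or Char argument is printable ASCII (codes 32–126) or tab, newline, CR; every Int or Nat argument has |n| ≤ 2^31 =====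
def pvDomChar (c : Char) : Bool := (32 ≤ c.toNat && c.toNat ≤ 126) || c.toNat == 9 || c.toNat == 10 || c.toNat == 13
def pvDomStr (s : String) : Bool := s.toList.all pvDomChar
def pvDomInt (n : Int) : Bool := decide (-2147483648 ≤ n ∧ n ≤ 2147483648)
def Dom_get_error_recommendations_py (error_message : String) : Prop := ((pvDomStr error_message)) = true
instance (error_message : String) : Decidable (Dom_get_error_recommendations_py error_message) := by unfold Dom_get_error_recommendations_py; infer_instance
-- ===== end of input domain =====

-- B replaces A's six sequential if-branches by a flat keyword→group-index map: it collects
-- ALL matched group indices in one comprehension and returns the tips of the minimum index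
-- (objective: alternative — aggregation by min instead of an early-return chain).

-- ===== PORT A =====
-- literal transliteration: lower once, then six sequential ifs, each with its own tips list
def get_error_recommendations_py (error_message : String) : Option String :=
  let error_lower := PySem.Str.lower error_message
  if (["webhook", "failed to resolve host"].any (fun keyword => PySem.Str.isIn keyword error_lower)) then
    let tips := ["• Проверьте WEBHOOK_HOST в .env",
      "• Убедитесь что домен доступен извне",
      "• Проверьте SSL сертификат (должен быть валидный)",
      "• Проверьте reverse proxy (nginx/caddy)",
      "• Проверьте сеть Docker (docker network)",
      "• Попробуйте: docker compose restart"]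
    some ("<blockquote expandable>💡 <b>Рекомендации:</b>\n" ++ PySem.Str.join "\n" tips ++ "</blockquote>")
  else if (["database", "postgres", "connection refused"].any (fun keyword => PySem.Str.isIn keyword error_lower)) then
    let tips := ["• Проверьте что PostgreSQL запущен",
      "• Проверьте DATABASE_URL в .env",
      "• Проверьте сеть Docker между контейнерами",
      "• Попробуйте: docker compose restart db"]
    some ("<blockquote expandable>💡 <b>Рекомендации:</b>\n" ++ PySem.Str.join "\n" tips ++ "</blockquote>")
  else if PySem.Str.isIn "redis" error_lower then
    let tips := ["• Проверьте что Redis запущен",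
      "• Проверьте REDIS_URL в .env",
      "• Попробуйте: docker compose restart redis"]
    some ("<blockquote expandable>💡 <b>Рекомендации:</b>\n" ++ PySem.Str.join "\n" tips ++ "</blockquote>")
  else if (["remnawave", "panel"].any (fun keyword => PySem.Str.isIn keyword error_lower)) then
    let tips := ["• Проверьте REMNAWAVE_API_URL в .env",
      "• Проверьте REMNAWAVE_API_KEY",
      "• Убедитесь что панель Remnawave доступна"]
    some ("<blockquote expandable>💡 <b>Рекомендации:</b>\n" ++ PySem.Str.join "\n" tips ++ "</blockquote>")
  else if (["unauthorized", "bot token"].any (fun keyword => PySem.Str.isIn keyword error_lower)) then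
    let tips := ["• Проверьте BOT_TOKEN в .env",
      "• Убедитесь что токен актуален (@BotFather)"]
    some ("<blockquote expandable>💡 <b>Рекомендации:</b>\n" ++ PySem.Str.join "\n" tips ++ "</blockquote>")
  else if (["web app url", "url host is empty", "unsupported url protocol", "button url"].any (fun keyword => PySem.Str.isIn keyword error_lower)) then
    let tips := ["• Проверьте MINIAPP_CUSTOM_URL в .env",
      "• Проверьте HAPP_CRYPTOLINK_REDIRECT_TEMPLATE",
      "• Telegram не поддерживает кастомные схемы (happ://, v2ray://, ss://, и т.д.) в inline-кнопках",
      "• Используйте HTTPS редирект для диплинков"]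
    some ("<blockquote expandable>💡 <b>Рекомендации:</b>\n" ++ PySem.Str.join "\n" tips ++ "</blockquote>")
  else
    none

-- ===== PORT B =====
-- Source B's flat keyword → group-index map, in insertion order
def pvKeywordGroup : List (String × Nat) :=
  [("webhook", 0), ("failed to resolve host", 0),
   ("database", 1), ("postgres", 1), ("connection refused", 1),
   ("redis", 2),
   ("remnawave", 3), ("panel", 3),
   ("unauthorized", 4), ("bot token", 4),
   ("web app url", 5), ("url host is empty", 5), ("unsupported url protocol", 5), ("button url", 5)]

-- Source B's _TIPS lookup
def pvTips (g : Nat) : List String :=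
  match g with
  | 0 => ["• Проверьте WEBHOOK_HOST в .env",
      "• Убедитесь что домен доступен извне",
      "• Проверьте SSL сертификат (должен быть валидный)",
      "• Проверьте reverse proxy (nginx/caddy)",
      "• Проверьте сеть Docker (docker network)",
      "• Попробуйте: docker compose restart"]
  | 1 => ["• Проверьте что PostgreSQL запущен",
      "• Проверьте DATABASE_URL в .env",
      "• Проверьте сеть Docker между контейнерами",
      "• Попробуйте: docker compose restart db"]
  | 2 => ["• Проверьте что Redis запущен",
      "• Проверьте REDIS_URL в .env",
      "• Попробуйте: docker compose restart redis"]
  | 3 => ["• Проверьте REMNAWAVE_API_URL в .env",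
      "• Проверьте REMNAWAVE_API_KEY",
      "• Убедитесь что панель Remnawave доступна"]
  | 4 => ["• Проверьте BOT_TOKEN в .env",
      "• Убедитесь что токен актуален (@BotFather)"]
  | _ => ["• Проверьте MINIAPP_CUSTOM_URL в .env",
      "• Проверьте HAPP_CRYPTOLINK_REDIRECT_TEMPLATE",
      "• Telegram не поддерживает кастомные схемы (happ://, v2ray://, ss://, и т.д.) в inline-кнопках",
      "• Используйте HTTPS редирект для диплинков"]

-- Source B: comprehension of matched group indices, then min (guarded by the emptiness test)
def get_error_recommendations_py_alt (error_message : String) : Option String :=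
  let error_lower := PySem.Str.lower error_message
  let matched := (pvKeywordGroup.filter (fun p => PySem.Str.isIn p.1 error_lower)).map Prod.snd
  match PySem.List.min? matched (fun x => x) with
  | none => none
  | some g => some ("<blockquote expandable>💡 <b>Рекомендации:</b>\n" ++ PySem.Str.join "\n" (pvTips g) ++ "</blockquote>")

-- ===== PRECONDITION & SPEC =====
def Spec_get_error_recommendations_py (error_message : String) (out : Option String) : Prop := out = get_error_recommendations_py_alt error_message
instance (error_message : String) (out : Option String) : Decidable (Spec_get_error_recommendations_py error_message out) := by unfold Spec_get_error_recommendations_py; infer_instance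

-- ===== CLAIM (what is proved, stated in full; the proofs are below) =====
def Claim_equal_get_error_recommendations_py : Prop := ∀ (error_message : String), Dom_get_error_recommendations_py error_message → Spec_get_error_recommendations_py error_message (get_error_recommendations_py error_message)

-- ===== LEMMAS AND PROOFS =====

-- chain-of-ifs on group disjunctions = min of the matched indices of the flat table,
-- as a pure boolean fact over the 14 keyword-match booleans
theorem pv_key (b0 b1 b2 b3 b4 b5 b6 b7 b8 b9 b10 b11 b12 b13 : Bool) :
    (if b0 || b1 then some 0
     else if b2 || (b3 || b4) then some 1
     else if b5 then some 2
     else if b6 || b7 then some 3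
     else if b8 || b9 then some 4
     else if b10 || (b11 || (b12 || b13)) then some 5
     else none)
    = PySem.List.min?
        ((([((b0), (0 : Nat)), (b1, 0), (b2, 1), (b3, 1), (b4, 1), (b5, 2), (b6, 3), (b7, 3),
            (b8, 4), (b9, 4), (b10, 5), (b11, 5), (b12, 5), (b13, 5)].filter Prod.fst).map Prod.snd))
        (fun x => x) := by
  revert b0 b1 b2 b3 b4 b5 b6 b7 b8 b9 b10 b11 b12 b13
  decide

-- pushing the keyword test into a boolean table commutes with filter+map (general fact)
theorem pv_filter_map {q : String → Bool} (L : List (String × Nat)) :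
    (L.filter (fun p => q p.1)).map Prod.snd
    = ((L.map (fun p => (q p.1, p.2))).filter Prod.fst).map Prod.snd := by
  induction L with
  | nil => rfl
  | cons a t ih => by_cases h : q a.1 <;> simp [h, ih]

-- ===== VERDICT (by name: the statement is the Claim_ definition above) =====
theorem get_error_recommendations_py_spec : Claim_equal_get_error_recommendations_py := by
  intro error_message _
  unfold Spec_get_error_recommendations_py
  unfold get_error_recommendations_py get_error_recommendations_py_alt
  simp only [List.any_cons, List.any_nil, Bool.or_false]
  rw [pv_filter_map (q := fun k => PySem.Str.isIn k (PySem.Str.lower error_message))]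
  simp only [pvKeywordGroup, List.map_cons, List.map_nil]
  rw [← pv_key]
  split_ifs <;> rfl
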